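-- pv_equiv track=rewrite | github.com/pagarc24/giw | practica1/pr1.py | dimension
-- ===== SOURCE A (Python) =====
-- def dimension(matriz):
--     """Devuelve una tupla (filas, columnas) con el tamaño de la matriz"""
--     num_fil = len(matriz)
--     num_col = 0
--     mal = False
--
--     if num_fil != 0:
--         num_col = len(matriz[0])
--         i = 1
--         while i < len(matriz) and not mal:
--             if num_col != len(matriz[i]):
--                 mal = True
--             else:
--                 i = i + 1
--
--     if num_col == 0 or mal:
--         return None
--
--     result = (num_fil, num_col)
--     return result
-- ===== SOURCE B (Python) =====
-- def dimension(matriz):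
--     """Devuelve una tupla (filas, columnas) con el tamaño de la matriz"""
--     if not matriz:
--         return None
--     widths = [len(fila) for fila in matriz]
--     lo = min(widths)
--     hi = max(widths)
--     if lo != hi or hi == 0:
--         return None
--     return (len(matriz), hi)
-- ===== Notes on version B (the rewrite author's own statement) =====
-- stated objective: alternative
-- what changed: Replaces A's sequential compare-each-row-to-the-first scan with a 'mal' flag by an aggregate test: build the list of row widths, take its min and max, and declare the matrix rectangular iff min == max != 0.
import Mathlib
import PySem

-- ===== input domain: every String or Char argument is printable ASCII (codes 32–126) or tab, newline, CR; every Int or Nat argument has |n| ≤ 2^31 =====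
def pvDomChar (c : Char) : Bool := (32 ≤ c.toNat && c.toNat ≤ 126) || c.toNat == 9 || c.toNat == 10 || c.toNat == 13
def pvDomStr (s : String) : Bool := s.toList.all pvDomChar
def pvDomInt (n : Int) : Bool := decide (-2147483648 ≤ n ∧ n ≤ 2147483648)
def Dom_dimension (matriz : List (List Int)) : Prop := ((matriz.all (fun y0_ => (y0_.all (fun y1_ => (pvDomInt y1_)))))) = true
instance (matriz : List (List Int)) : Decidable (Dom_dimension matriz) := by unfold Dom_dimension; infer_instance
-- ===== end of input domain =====

-- B replaces A's sequential compare-each-row-to-the-first scan (with a 'mal' flag) by an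
-- aggregate test: min and max of the list of row widths, rectangular iff min == max != 0.

-- ===== PORT A =====
-- the while loop: 'while i < len(matriz) and not mal: if num_col != len(matriz[i]): mal = True else: i += 1'
def dimLoop (matriz : List (List Int)) (numCol : Int) (i : Nat) (mal : Bool) : Bool :=
  if _h : i < matriz.length ∧ mal = false then
    if numCol ≠ ((matriz.getD i []).length : Int) then dimLoop matriz numCol i true
    else dimLoop matriz numCol (i + 1) mal
  else mal
termination_by (matriz.length - i) + (if mal then 0 else 1)
decreasing_by
  all_goals simp_all
  all_goals omega

def dimension (matriz : List (List Int)) : Option (Int × Int) :=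
  let numFil : Int := matriz.length
  let numCol : Int := 0
  let numCol : Int := if matriz.length ≠ 0 then ((matriz.headD []).length : Int) else numCol
  let mal : Bool := if matriz.length ≠ 0 then dimLoop matriz numCol 1 false else false
  if numCol = 0 ∨ mal = true then none
  else some (numFil, numCol)

-- ===== PORT B =====
def dimension_alt (matriz : List (List Int)) : Option (Int × Int) :=
  if matriz = [] then none
  else
    let widths : List Int := matriz.map (fun fila => (fila.length : Int))
    match PySem.List.min? widths (fun x => x), PySem.List.max? widths (fun x => x) with
    | some lo, some hi =>
        if lo ≠ hi ∨ hi = 0 then none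
        else some ((matriz.length : Int), hi)
    | _, _ => none

-- ===== PRECONDITION & SPEC =====
def Spec_dimension (matriz : List (List Int)) (out : Option (Int × Int)) : Prop := out = dimension_alt matriz
instance (matriz : List (List Int)) (out : Option (Int × Int)) : Decidable (Spec_dimension matriz out) := by unfold Spec_dimension; infer_instance

-- ===== CLAIM (what is proved, stated in full; the proofs are below) =====
def Claim_equal_dimension : Prop := ∀ (matriz : List (List Int)), Dom_dimension matriz → Spec_dimension matriz (dimension matriz)

-- ===== LEMMAS AND PROOFS =====

-- A's loop returns TRUE iff some row from index i on has length ≠ numCol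
theorem dimLoop_eq (matriz : List (List Int)) (numCol : Int) :
    ∀ i, dimLoop matriz numCol i false
      = !((matriz.drop i).all (fun s => (s.length : Int) == numCol)) := by
  intro i
  induction hfu : matriz.length - i using Nat.strong_induction_on generalizing i with
  | _ n ih =>
    rw [dimLoop.eq_def]
    by_cases hi : i < matriz.length
    · have hd : matriz.drop i = matriz[i] :: matriz.drop (i + 1) :=
        List.drop_eq_getElem_cons hi
      have hg : matriz.getD i [] = matriz[i] := by
        simp [List.getD_eq_getElem?_getD, hi]
      rw [hg, hd, dif_pos ⟨hi, rfl⟩]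
      by_cases hne : numCol = (matriz[i].length : Int)
      · rw [if_neg (by simpa using hne),
          ih (matriz.length - (i + 1)) (by omega) (i + 1) rfl, List.all_cons]
        have hb : ((matriz[i].length : Int) == numCol) = true := by simp [hne]
        rw [hb, Bool.true_and]
      · rw [if_pos hne, dimLoop.eq_def, dif_neg (by simp), List.all_cons]
        have hb : ((matriz[i].length : Int) == numCol) = false := by
          exact beq_eq_false_iff_ne.mpr (fun h => hne h.symm)
        rw [hb, Bool.false_and, Bool.not_false]
    · have hd : matriz.drop i = [] := List.drop_eq_nil_of_le (by omega)
      simp [hi, hd]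

-- ===== VERDICT (by name: the statement is the Claim_ definition above) =====
theorem dimension_spec : Claim_equal_dimension := by
  intro matriz _
  match matriz with
  | [] => simp [Spec_dimension, dimension, dimension_alt]
  | r :: rs =>
    have hw : (r :: rs).map (fun fila => (fila.length : Int))
        = (r.length : Int) :: rs.map (fun fila => (fila.length : Int)) := rfl
    have hminc : PySem.List.min? ((r :: rs).map (fun fila => (fila.length : Int))) (fun x => x)
        = some ((rs.map (fun fila => (fila.length : Int))).foldl min (r.length : Int)) := by
      rw [hw]; exact PySem.List.min?_id_cons _ _
    have hmaxc : PySem.List.max? ((r :: rs).map (fun fila => (fila.length : Int))) (fun x => x)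
        = some ((rs.map (fun fila => (fila.length : Int))).foldl max (r.length : Int)) := by
      rw [hw]; exact PySem.List.max?_id_cons _ _
    have hlomem := PySem.List.min?_mem hminc
    have hhimem := PySem.List.max?_mem hmaxc
    have hlomin : ∀ y ∈ (r :: rs).map (fun fila => (fila.length : Int)),
        (rs.map (fun fila => (fila.length : Int))).foldl min (r.length : Int) ≤ y :=
      fun y hy => PySem.List.min?_isMin hminc y hy
    have hhimax : ∀ y ∈ (r :: rs).map (fun fila => (fila.length : Int)),
        y ≤ (rs.map (fun fila => (fila.length : Int))).foldl max (r.length : Int) :=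
      fun y hy => PySem.List.max?_isMax hmaxc y hy
    have hcmem : (r.length : Int) ∈ (r :: rs).map (fun fila => (fila.length : Int)) := by simp
    have hB : dimension_alt (r :: rs)
        = (if (rs.map (fun fila => (fila.length : Int))).foldl min (r.length : Int)
              ≠ (rs.map (fun fila => (fila.length : Int))).foldl max (r.length : Int)
            ∨ (rs.map (fun fila => (fila.length : Int))).foldl max (r.length : Int) = 0
           then none
           else some (((r :: rs).length : Int),
             (rs.map (fun fila => (fila.length : Int))).foldl max (r.length : Int))) := by
      simp only [dimension_alt, hminc, hmaxc]
      simp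
    by_cases hall : rs.all (fun s => (s.length : Int) == (r.length : Int))
    · have hallw : ∀ y ∈ (r :: rs).map (fun fila => (fila.length : Int)), y = (r.length : Int) := by
        intro y hy
        obtain ⟨s, hs, rfl⟩ := List.mem_map.mp hy
        rcases List.mem_cons.mp hs with h | h
        · rw [h]
        · simpa using List.all_eq_true.mp hall s h
      have hloc := hallw _ hlomem
      have hhic := hallw _ hhimem
      have hmal : dimLoop (r :: rs) (r.length : Int) 1 false = false := by
        rw [dimLoop_eq]; simpa using hall
      have hA : dimension (r :: rs)
          = (if (r.length : Int) = 0 then none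
             else some (((r :: rs).length : Int), (r.length : Int))) := by
        simp [dimension, hmal]
      show dimension (r :: rs) = dimension_alt (r :: rs)
      rw [hA, hB, hloc, hhic]
      by_cases hz : (r.length : Int) = 0
      · simp [hz]
      · simp
    · obtain ⟨s, hs, hne⟩ : ∃ s ∈ rs, (s.length : Int) ≠ (r.length : Int) := by simpa using hall
      have hxmem : (s.length : Int) ∈ (r :: rs).map (fun fila => (fila.length : Int)) :=
        List.mem_map_of_mem (List.mem_cons_of_mem _ hs)
      have hlohine : (rs.map (fun fila => (fila.length : Int))).foldl min (r.length : Int)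
          ≠ (rs.map (fun fila => (fila.length : Int))).foldl max (r.length : Int) := by
        rcases lt_or_gt_of_ne hne with h | h
        · have h1 := hlomin _ hxmem
          have h2 := hhimax _ hcmem
          omega
        · have h1 := hlomin _ hcmem
          have h2 := hhimax _ hxmem
          omega
      have hmal : dimLoop (r :: rs) (r.length : Int) 1 false = true := by
        rw [dimLoop_eq]
        simp only [List.drop_one, List.tail_cons]
        simpa using hall
      have hA : dimension (r :: rs) = none := by simp [dimension, hmal]
      show dimension (r :: rs) = dimension_alt (r :: rs)
      rw [hA, hB, if_pos (Or.inl hlohine)]
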